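-- pv_equiv track=rewrite | github.com/Hall-No-7/ps-study | cjeongmin/2018-kakao-friends-4-block.py | removeBlocks
-- ===== SOURCE A (Python) =====
-- def removeBlocks(m, n, board):
--     blocks = set()
--     for r in range(m-1):
--         for c in range(n-1):
--             if (
--                 board[r][c] != ''
--                 and board[r][c] == board[r][c+1]
--                 and board[r][c] == board[r+1][c]
--                 and board[r][c] == board[r+1][c+1]
--             ):
--                 blocks |= {(r, c), (r, c+1), (r+1, c), (r+1, c+1)}
--     for r, c in blocks:
--         board[r][c] = ''
--     return len(blocks)
-- ===== SOURCE B (Python) =====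
-- def removeBlocks(m, n, board):
--     def full(tr, tc):
--         if tr < 0 or tc < 0 or tr >= m - 1 or tc >= n - 1:
--             return False
--         v = board[tr][tc]
--         return (v != ''
--                 and v == board[tr][tc + 1]
--                 and v == board[tr + 1][tc]
--                 and v == board[tr + 1][tc + 1])
--
--     marked = [[full(r - 1, c - 1) or full(r - 1, c) or full(r, c - 1) or full(r, c)
--                for c in range(n)] for r in range(m)]
--     count = 0
--     for r in range(m):
--         for c in range(n):
--             if marked[r][c]:
--                 board[r][c] = ''
--                 count += 1
--     return count
-- ===== Notes on version B (the rewrite author's own statement) =====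
-- stated objective: alternative
-- what changed: B iterates cell-wise (marking each cell touched by one of the up-to-four full 2x2 blocks around it, read from the unmodified board, then counting marked cells in a second pass) instead of A's block-wise loop accumulating a coordinate set and returning its size.
-- outside the precondition, e.g. on removeBlocks(2, 2, [[''], ['']]): A returns 0, B returns 0
import Mathlib
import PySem

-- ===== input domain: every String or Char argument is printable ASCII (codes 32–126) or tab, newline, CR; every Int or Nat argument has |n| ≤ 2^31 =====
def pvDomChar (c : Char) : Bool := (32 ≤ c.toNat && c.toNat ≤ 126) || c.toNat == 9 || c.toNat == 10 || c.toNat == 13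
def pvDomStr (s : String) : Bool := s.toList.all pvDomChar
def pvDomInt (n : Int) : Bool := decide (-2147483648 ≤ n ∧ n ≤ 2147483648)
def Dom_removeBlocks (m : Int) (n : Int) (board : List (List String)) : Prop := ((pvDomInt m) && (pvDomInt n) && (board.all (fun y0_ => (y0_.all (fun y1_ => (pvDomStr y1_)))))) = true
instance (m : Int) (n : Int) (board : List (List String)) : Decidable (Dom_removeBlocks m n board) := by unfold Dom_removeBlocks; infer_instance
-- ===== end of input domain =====

-- B re-decomposes A cell-wise (mark each cell touched by a full 2x2 block, then count marked cells)
-- instead of block-wise with a coordinate set; same return value and the same in-place clearing of board.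

-- ===== PORT A =====
-- A's 2x2 test at top-left (r,c), named for the proofs (the reads are A's, in A's order)
def pvCond (board : List (List String)) (r c : Int) : Bool :=
  decide (PySem.List.pyGetD (PySem.List.pyGetD board r []) c "" ≠ ""
    ∧ PySem.List.pyGetD (PySem.List.pyGetD board r []) c ""
        = PySem.List.pyGetD (PySem.List.pyGetD board r []) (c+1) ""
    ∧ PySem.List.pyGetD (PySem.List.pyGetD board r []) c ""
        = PySem.List.pyGetD (PySem.List.pyGetD board (r+1) []) c ""
    ∧ PySem.List.pyGetD (PySem.List.pyGetD board r []) c ""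
        = PySem.List.pyGetD (PySem.List.pyGetD board (r+1) []) (c+1) "")

def removeBlocks (m : Int) (n : Int) (board : List (List String)) : Int :=
  -- blocks = set(); nested loops over block top-left corners; `blocks |= {...}` = Set.update
  let blocks : PySem.Set (Int × Int) :=
    (PySem.List.pyRange 0 (m-1) 1).foldl (fun s r =>
      (PySem.List.pyRange 0 (n-1) 1).foldl (fun s c =>
        if pvCond board r c then
          PySem.Set.update s [(r, c), (r, c+1), (r+1, c), (r+1, c+1)]
        else s) s)
      PySem.Set.empty
  -- the clearing loop mutates board only; return len(blocks)
  (blocks.length : Int)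

-- ===== PORT B =====
-- Source B's `full(tr, tc)`: bounds guard, then the same four reads
def pvFull (m : Int) (n : Int) (board : List (List String)) (tr tc : Int) : Bool :=
  if tr < 0 ∨ tc < 0 ∨ m - 1 ≤ tr ∨ n - 1 ≤ tc then false
  else
    decide (PySem.List.pyGetD (PySem.List.pyGetD board tr []) tc "" ≠ ""
      ∧ PySem.List.pyGetD (PySem.List.pyGetD board tr []) tc ""
          = PySem.List.pyGetD (PySem.List.pyGetD board tr []) (tc+1) ""
      ∧ PySem.List.pyGetD (PySem.List.pyGetD board tr []) tc ""
          = PySem.List.pyGetD (PySem.List.pyGetD board (tr+1) []) tc ""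
      ∧ PySem.List.pyGetD (PySem.List.pyGetD board tr []) tc ""
          = PySem.List.pyGetD (PySem.List.pyGetD board (tr+1) []) (tc+1) "")

def removeBlocks_alt (m : Int) (n : Int) (board : List (List String)) : Int :=
  -- marked[r][c] := some of the up-to-four blocks touching (r,c) is full
  let marked : List (List Bool) :=
    (PySem.List.pyRange 0 m 1).map (fun r =>
      (PySem.List.pyRange 0 n 1).map (fun c =>
        pvFull m n board (r-1) (c-1) || pvFull m n board (r-1) c
          || pvFull m n board r (c-1) || pvFull m n board r c))
  -- second pass: count (and in Python clear) the marked cells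
  (PySem.List.pyRange 0 m 1).foldl (fun cnt r =>
    (PySem.List.pyRange 0 n 1).foldl (fun cnt c =>
      if PySem.List.pyGetD (PySem.List.pyGetD marked r []) c false then cnt + 1 else cnt) cnt) 0

-- ===== PRECONDITION & SPEC =====
-- Pre_ asks for an honest m-by-n board (when m,n ≥ 2): outside it Python A's reads
-- board[r][c+1], board[r+1][c], board[r+1][c+1] raise IndexError, except on boards where
-- an '' cell short-circuits every four-cell test before the out-of-range read (both
-- programs return 0 there, e.g. the cite in claim.json).
def Pre_removeBlocks (m : Int) (n : Int) (board : List (List String)) : Prop :=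
  2 ≤ m → 2 ≤ n → (m ≤ (board.length : Int) ∧ ∀ row ∈ board.take m.toNat, n ≤ (row.length : Int))
instance (m : Int) (n : Int) (board : List (List String)) : Decidable (Pre_removeBlocks m n board) := by unfold Pre_removeBlocks; infer_instance

def pvWitness_removeBlocks : Int × Int × List (List String) :=
  (2, 2, [["a", "a"], ["a", "a"]])

def Spec_removeBlocks (m : Int) (n : Int) (board : List (List String)) (out : Int) : Prop := out = removeBlocks_alt m n board
instance (m : Int) (n : Int) (board : List (List String)) (out : Int) : Decidable (Spec_removeBlocks m n board out) := by unfold Spec_removeBlocks; infer_instance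

-- ===== CLAIM (what is proved, stated in full; the proofs are below) =====
def Claim_equal_removeBlocks : Prop := ∀ (m : Int) (n : Int) (board : List (List String)), Dom_removeBlocks m n board → Pre_removeBlocks m n board → Spec_removeBlocks m n board (removeBlocks m n board)

-- ===== LEMMAS AND PROOFS =====

-- the set A's nested loops build (defeq to the `let blocks` in removeBlocks)
def pvBlocks (m n : Int) (board : List (List String)) : PySem.Set (Int × Int) :=
  (PySem.List.pyRange 0 (m-1) 1).foldl (fun s r =>
    (PySem.List.pyRange 0 (n-1) 1).foldl (fun s c =>
      if pvCond board r c then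
        PySem.Set.update s [(r, c), (r, c+1), (r+1, c), (r+1, c+1)]
      else s) s)
    PySem.Set.empty

-- the cell-wise predicate B tabulates
def pvMk (m n : Int) (board : List (List String)) (r c : Int) : Bool :=
  pvFull m n board (r-1) (c-1) || pvFull m n board (r-1) c
    || pvFull m n board r (c-1) || pvFull m n board r c

-- the marked cells, as a filtered grid list
def pvS (m n : Int) (board : List (List String)) : List (Int × Int) :=
  ((PySem.List.pyRange 0 m 1).flatMap (fun r =>
      (PySem.List.pyRange 0 n 1).map (fun c => (r, c)))).filter
    (fun p => pvMk m n board p.1 p.2)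

theorem pvFull_iff (m n : Int) (board : List (List String)) (tr tc : Int) :
    pvFull m n board tr tc = true ↔
      (0 ≤ tr ∧ tr < m - 1 ∧ 0 ≤ tc ∧ tc < n - 1 ∧ pvCond board tr tc = true) := by
  unfold pvFull pvCond
  split_ifs with h
  · simp; omega
  · simp only [decide_eq_true_eq]
    constructor
    · intro hc; exact ⟨by omega, by omega, by omega, by omega, by simpa using hc⟩
    · rintro ⟨_, _, _, _, hc⟩; simpa using hc

theorem mem_foldl_of_step {α β : Type} (l : List β) (F : List α → β → List α)
    (Q : β → α → Prop) (h : ∀ s x y, y ∈ F s x ↔ y ∈ s ∨ Q x y) :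
    ∀ (s : List α) (y : α), y ∈ l.foldl F s ↔ y ∈ s ∨ ∃ x ∈ l, Q x y := by
  induction l with
  | nil => intro s y; simp
  | cons b t ih =>
    intro s y
    simp only [List.foldl_cons, ih, h, List.mem_cons]
    constructor
    · rintro (⟨hy | hq⟩ | ⟨x, hx, hq⟩)
      · exact Or.inl hy
      · exact Or.inr ⟨b, Or.inl rfl, hq⟩
      · exact Or.inr ⟨x, Or.inr hx, hq⟩
    · rintro (hy | ⟨x, hx | hx, hq⟩)
      · exact Or.inl (Or.inl hy)
      · exact Or.inl (Or.inr (hx ▸ hq))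
      · exact Or.inr ⟨x, hx, hq⟩

theorem nodup_foldl_of_step {α β : Type} (l : List β) (F : List α → β → List α)
    (h : ∀ s x, s.Nodup → (F s x).Nodup) :
    ∀ s : List α, s.Nodup → (l.foldl F s).Nodup := by
  induction l with
  | nil => intro s hs; simpa using hs
  | cons b t ih => intro s hs; exact ih _ (h s b hs)

-- membership in A's accumulated set
theorem mem_pvBlocks (m n : Int) (board : List (List String)) (p : Int × Int) :
    p ∈ pvBlocks m n board ↔
    ∃ r ∈ PySem.List.pyRange 0 (m-1) 1, ∃ c ∈ PySem.List.pyRange 0 (n-1) 1,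
      pvCond board r c = true ∧ p ∈ [(r, c), (r, c+1), (r+1, c), (r+1, c+1)] := by
  have hinner : ∀ (r : Int) (s : PySem.Set (Int × Int)) (y : Int × Int),
      y ∈ (PySem.List.pyRange 0 (n-1) 1).foldl (fun s c =>
        if pvCond board r c then
          PySem.Set.update s [(r, c), (r, c+1), (r+1, c), (r+1, c+1)]
        else s) s ↔
      y ∈ s ∨ ∃ c ∈ PySem.List.pyRange 0 (n-1) 1,
        pvCond board r c = true ∧ y ∈ [(r, c), (r, c+1), (r+1, c), (r+1, c+1)] := by
    intro r s y
    apply mem_foldl_of_step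
    intro s c y
    by_cases hc : pvCond board r c = true
    · simp only [hc, if_true, PySem.Set.mem_update]
      simp
    · simp [hc]
  unfold pvBlocks
  rw [mem_foldl_of_step _ _
    (fun r y => ∃ c ∈ PySem.List.pyRange 0 (n-1) 1,
      pvCond board r c = true ∧ y ∈ [(r, c), (r, c+1), (r+1, c), (r+1, c+1)])
    (fun s r y => hinner r s y)]
  simp [PySem.Set.empty]

theorem nodup_pvBlocks (m n : Int) (board : List (List String)) :
    (pvBlocks m n board).Nodup := by
  unfold pvBlocks
  apply nodup_foldl_of_step
  · intro s r hs
    apply nodup_foldl_of_step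
    · intro s c hs
      split_ifs
      · exact PySem.Set.nodup_update _ _ hs
      · exact hs
    · exact hs
  · simp [PySem.Set.empty]

theorem nodup_pvS (m n : Int) (board : List (List String)) : (pvS m n board).Nodup := by
  apply List.Nodup.filter
  refine List.nodup_flatMap.2 ⟨?_, ?_⟩
  · intro r _
    exact (PySem.List.nodup_pyRange_one 0 n).map (fun a b h => by simpa using h)
  · refine (PySem.List.pairwise_lt_pyRange_one 0 m).imp ?_
    intro a b hlt
    simp only [Function.onFun, List.Disjoint, List.mem_map]
    rintro p ⟨c, _, rfl⟩ ⟨c', _, hp⟩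
    have : b = a := by simpa using congrArg Prod.fst hp
    omega

theorem mem_pvS (m n : Int) (board : List (List String)) (p : Int × Int) :
    p ∈ pvS m n board ↔
      (0 ≤ p.1 ∧ p.1 < m ∧ 0 ≤ p.2 ∧ p.2 < n ∧ pvMk m n board p.1 p.2 = true) := by
  unfold pvS
  simp only [List.mem_filter, List.mem_flatMap, List.mem_map, PySem.List.mem_pyRange_one]
  constructor
  · rintro ⟨⟨r, hr, c, hc, rfl⟩, hmk⟩
    exact ⟨hr.1, hr.2, hc.1, hc.2, hmk⟩
  · rintro ⟨h1, h2, h3, h4, hmk⟩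
    exact ⟨⟨p.1, ⟨h1, h2⟩, p.2, ⟨h3, h4⟩, rfl⟩, hmk⟩

-- the central combinatorial fact: a cell is in A's set iff B marks it
theorem mem_pvBlocks_iff_mem_pvS (m n : Int) (board : List (List String)) (p : Int × Int) :
    p ∈ pvBlocks m n board ↔ p ∈ pvS m n board := by
  rw [mem_pvBlocks, mem_pvS]
  simp only [PySem.List.mem_pyRange_one, pvMk, Bool.or_eq_true, pvFull_iff,
    List.mem_cons, List.not_mem_nil, or_false]
  constructor
  · rintro ⟨r, ⟨hr0, hr1⟩, c, ⟨hc0, hc1⟩, hcond, hp | hp | hp | hp⟩ <;> subst hp <;>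
      refine ⟨by omega, by omega, by omega, by omega, ?_⟩
    · exact Or.inr ⟨by omega, by omega, by omega, by omega, hcond⟩
    · exact Or.inl (Or.inr ⟨by omega, by omega, by omega, by omega, by simpa using hcond⟩)
    · exact Or.inl (Or.inl (Or.inr ⟨by omega, by omega, by omega, by omega, by simpa using hcond⟩))
    · exact Or.inl (Or.inl (Or.inl ⟨by omega, by omega, by omega, by omega, by simpa using hcond⟩))
  · rintro ⟨h1, h2, h3, h4, (((⟨a1, a2, a3, a4, hc⟩ | ⟨a1, a2, a3, a4, hc⟩) |
      ⟨a1, a2, a3, a4, hc⟩) | ⟨a1, a2, a3, a4, hc⟩)⟩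
    · refine ⟨p.1 - 1, ⟨by omega, by omega⟩, p.2 - 1, ⟨by omega, by omega⟩, hc, ?_⟩
      right; right; right; simp
    · refine ⟨p.1 - 1, ⟨by omega, by omega⟩, p.2, ⟨by omega, by omega⟩, hc, ?_⟩
      right; right; left; simp
    · refine ⟨p.1, ⟨by omega, by omega⟩, p.2 - 1, ⟨by omega, by omega⟩, hc, ?_⟩
      right; left; simp
    · exact ⟨p.1, ⟨by omega, by omega⟩, p.2, ⟨by omega, by omega⟩, hc, Or.inl rfl⟩

-- B's double loop computes the length of pvS
theorem alt_eq_length_pvS (m n : Int) (board : List (List String)) :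
    removeBlocks_alt m n board = ((pvS m n board).length : Int) := by
  unfold removeBlocks_alt
  simp only []
  have hcong : ∀ (cnt : Int), ∀ r ∈ PySem.List.pyRange 0 m 1,
      (PySem.List.pyRange 0 n 1).foldl (fun cnt c =>
        if PySem.List.pyGetD (PySem.List.pyGetD
            ((PySem.List.pyRange 0 m 1).map (fun r =>
              (PySem.List.pyRange 0 n 1).map (fun c => pvMk m n board r c))) r []) c false
          then cnt + 1 else cnt) cnt
      = cnt + (((PySem.List.pyRange 0 n 1).countP (fun c => pvMk m n board r c) : Nat) : Int) := by
    intro cnt r hr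
    rw [PySem.List.mem_pyRange_one] at hr
    have hrow := PySem.List.pyGetD_map_pyRange_of_nonneg
      (fun r => (PySem.List.pyRange 0 n 1).map (fun c => pvMk m n board r c)) m r
      ([] : List Bool) hr.1 hr.2
    rw [PySem.List.foldl_congr_mem _ _
      (fun cnt c => if pvMk m n board r c then cnt + 1 else cnt) cnt ?_]
    · exact PySem.List.foldl_if_add_one _ _ cnt
    · intro acc c hc
      rw [PySem.List.mem_pyRange_one] at hc
      rw [hrow, PySem.List.pyGetD_map_pyRange_of_nonneg _ n c false hc.1 hc.2]
  rw [PySem.List.foldl_congr_mem _ _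
    (fun cnt r => cnt + (((PySem.List.pyRange 0 n 1).countP
      (fun c => pvMk m n board r c) : Nat) : Int)) 0 ?_]
  · rw [PySem.List.foldl_add]
    unfold pvS
    rw [← List.countP_eq_length_filter, List.countP_flatMap]
    rw [Nat.cast_list_sum]
    simp [Function.comp_def, List.countP_map]
  · intro cnt r hr
    show _ = _
    exact hcong cnt r hr

-- ===== VERDICT (by name: the statement is the Claim_ definition above) =====
theorem removeBlocks_spec : Claim_equal_removeBlocks := by
  intro m n board _ _
  unfold Spec_removeBlocks
  rw [alt_eq_length_pvS]
  have hA : removeBlocks m n board = ((pvBlocks m n board).length : Int) := rfl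
  rw [hA]
  have hperm : (pvBlocks m n board).Perm (pvS m n board) :=
    (List.perm_ext_iff_of_nodup (nodup_pvBlocks m n board) (nodup_pvS m n board)).2
      (mem_pvBlocks_iff_mem_pvS m n board)
  exact_mod_cast hperm.length_eq
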